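-- pv_equiv track=rewrite | github.com/systemsforfuture/JARVIS-OS-1.5- | core/integrations/omi/webhook_receiver.py | _is_voice_command
-- ===== SOURCE A (Python) =====
-- def _is_voice_command(text: str) -> bool:
--     """Erkennt ob ein Transkript-Segment ein Voice Command ist."""
--     triggers = [
--         "jarvis", "hey jarvis", "ok jarvis",
--         "erstell", "mach", "sende", "schreib",
--         "erinner mich", "merke dir", "notiere",
--         "status", "wie laeuft",
--     ]
--     text_lower = text.lower()
--     return any(trigger in text_lower for trigger in triggers)
-- ===== SOURCE B (Python) =====
-- import re
--
-- _TRIGGER_PATTERN = re.compile("|".join(re.escape(t) for t in [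
--     "jarvis", "hey jarvis", "ok jarvis",
--     "erstell", "mach", "sende", "schreib",
--     "erinner mich", "merke dir", "notiere",
--     "status", "wie laeuft",
-- ]))
--
--
-- def _is_voice_command(text: str) -> bool:
--     """Erkennt ob ein Transkript-Segment ein Voice Command ist."""
--     return bool(_TRIGGER_PATTERN.search(text.lower()))
-- ===== Notes on version B (the rewrite author's own statement) =====
-- stated objective: idiomatic
-- what changed: Replaces the twelve independent substring scans with one precompiled alternation regex searched once over the lowercased text (one left-to-right pass trying all triggers at each position).
import Mathlib
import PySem

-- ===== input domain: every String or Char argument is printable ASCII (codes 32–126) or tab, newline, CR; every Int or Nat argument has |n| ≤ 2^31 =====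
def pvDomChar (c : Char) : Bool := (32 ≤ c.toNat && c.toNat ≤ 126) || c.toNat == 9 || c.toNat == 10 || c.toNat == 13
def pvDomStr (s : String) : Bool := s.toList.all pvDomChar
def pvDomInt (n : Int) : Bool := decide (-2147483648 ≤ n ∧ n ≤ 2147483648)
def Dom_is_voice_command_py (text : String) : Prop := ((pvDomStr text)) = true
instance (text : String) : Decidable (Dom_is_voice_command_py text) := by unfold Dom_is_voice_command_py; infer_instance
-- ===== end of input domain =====

-- B replaces A's twelve independent substring scans by one combined left-to-right search
-- that tries every trigger at each position of the lowercased text (one pass, as a joined regex does).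

-- ===== PORT A =====
def pvTriggers : List String :=
  ["jarvis", "hey jarvis", "ok jarvis",
   "erstell", "mach", "sende", "schreib",
   "erinner mich", "merke dir", "notiere",
   "status", "wie laeuft"]

def is_voice_command_py (text : String) : Bool :=
  let text_lower := PySem.Str.lower text
  pvTriggers.any (fun trigger => PySem.Str.isIn trigger text_lower)

-- ===== PORT B =====
-- the same trigger literals, as the alternation branches of the compiled pattern
def pvTriggersL : List (List Char) := pvTriggers.map String.toList

-- does some alternation branch match at the current position?
def pvMatchHere (cs : List Char) : Bool :=
  pvTriggersL.any (fun t => t.isPrefixOf cs)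

-- re.search: try the alternation at each position, left to right
def pvScan : List Char → Bool
  | [] => pvMatchHere []
  | c :: tl => pvMatchHere (c :: tl) || pvScan tl

def is_voice_command_py_alt (text : String) : Bool :=
  pvScan (PySem.Chars.lower text.toList)

-- ===== PRECONDITION & SPEC =====
def Spec_is_voice_command_py (text : String) (out : Bool) : Prop := out = is_voice_command_py_alt text
instance (text : String) (out : Bool) : Decidable (Spec_is_voice_command_py text out) := by unfold Spec_is_voice_command_py; infer_instance

-- ===== CLAIM (what is proved, stated in full; the proofs are below) =====
def Claim_equal_is_voice_command_py : Prop := ∀ (text : String), Dom_is_voice_command_py text → Spec_is_voice_command_py text (is_voice_command_py text)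

-- ===== LEMMAS AND PROOFS =====
lemma pvScan_iff (l : List Char) : pvScan l = true ↔ ∃ t ∈ pvTriggersL, t <:+: l := by
  induction l with
  | nil => decide
  | cons c tl ih =>
    simp only [pvScan, pvMatchHere, Bool.or_eq_true, List.any_eq_true, ih]
    constructor
    · rintro (⟨t, ht, hp⟩ | ⟨t, ht, hi⟩)
      · exact ⟨t, ht, ((List.isPrefixOf_iff_prefix).mp hp).isInfix⟩
      · exact ⟨t, ht, hi.trans (List.infix_cons (List.infix_refl tl))⟩
    · rintro ⟨t, ht, hi⟩
      rcases (List.infix_cons_iff).mp hi with hp | hi'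
      · exact Or.inl ⟨t, ht, (List.isPrefixOf_iff_prefix).mpr hp⟩
      · exact Or.inr ⟨t, ht, hi'⟩

-- ===== VERDICT (by name: the statement is the Claim_ definition above) =====
theorem is_voice_command_py_spec : Claim_equal_is_voice_command_py := by
  intro text _
  unfold Spec_is_voice_command_py is_voice_command_py is_voice_command_py_alt
  rw [Bool.eq_iff_iff, pvScan_iff]
  simp only [List.any_eq_true, PySem.Str.isIn_iff_infix, PySem.Str.toList_lower,
    pvTriggersL, List.mem_map]
  constructor
  · rintro ⟨s, hs, hi⟩; exact ⟨s.toList, ⟨s, hs, rfl⟩, hi⟩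
  · rintro ⟨t, ⟨s, hs, rfl⟩, hi⟩; exact ⟨s, hs, hi⟩
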